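-- pv_equiv track=rewrite | github.com/v0lb1nary/Lab_Zone | Batalha_Naval/txt.py | get_pos_horizontal
-- ===== SOURCE A (Python) =====
-- def max_linhas_colunas(matriz, i, j):
--     if i >= len(matriz) or j >= len(matriz[i]):
--         return False
--     else:
--         return True
--
-- def get_pos_horizontal(matriz, tam):
--     possbl = ()
--     for i in range(0,len(matriz)):
--         for j in range(0, len(matriz[i])):
--             for h in range(0, tam):
--                 if h != tam-1:
--                     if tem_agua(matriz, i, (j+h)):
--                         pass
--                     else:
--                         break
--                 else:
--                     if tem_agua(matriz, i, (j+h)):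
--                         possbl += (i,j),
--
--     return possbl
--
-- def tem_agua(matriz, i, j):
--     if max_linhas_colunas(matriz, i, j):
--         if matriz[i][j] != 0:
--             return False
--         else:
--             return True
--     else:
--         return False
-- ===== SOURCE B (Python) =====
-- def get_pos_horizontal(matriz, tam):
--     # Per-row suffix run-lengths of consecutive water (0) cells, then a ship of
--     # length tam fits at (i, j) iff runs[j] >= tam.  O(rows*cols) instead of
--     # O(rows*cols*tam).
--     if tam <= 0:
--         return ()
--     res = []
--     for i, row in enumerate(matriz):
--         n = len(row)
--         runs = [0] * n
--         run = 0
--         for j in range(n - 1, -1, -1):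
--             run = run + 1 if row[j] == 0 else 0
--             runs[j] = run
--         res.extend((i, j) for j in range(n) if runs[j] >= tam)
--     return tuple(res)
-- ===== Notes on version B (the rewrite author's own statement) =====
-- stated objective: faster
-- what changed: Replaced the per-cell inner scan of tam cells by per-row suffix run-lengths of consecutive water cells computed in one backward pass, so each cell is tested with one comparison runs[j] >= tam.
import Mathlib
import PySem

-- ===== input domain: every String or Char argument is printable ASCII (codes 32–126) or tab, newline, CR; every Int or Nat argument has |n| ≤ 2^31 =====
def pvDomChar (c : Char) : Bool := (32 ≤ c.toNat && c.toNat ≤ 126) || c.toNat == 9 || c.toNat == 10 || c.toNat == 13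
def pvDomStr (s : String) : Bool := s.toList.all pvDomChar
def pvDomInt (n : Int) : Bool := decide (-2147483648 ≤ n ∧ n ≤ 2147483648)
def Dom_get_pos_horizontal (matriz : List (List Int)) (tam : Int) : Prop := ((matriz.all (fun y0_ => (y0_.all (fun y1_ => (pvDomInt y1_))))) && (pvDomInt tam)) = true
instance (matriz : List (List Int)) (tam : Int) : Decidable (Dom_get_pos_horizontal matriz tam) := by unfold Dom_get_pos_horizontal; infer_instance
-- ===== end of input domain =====

-- B replaces A's per-cell scan of tam cells by per-row suffix run-lengths of consecutive
-- water cells (one backward pass per row), then tests runs[j] >= tam per cell.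


-- ===== PORT A =====
-- helpers of A; A only ever calls them with 0 ≤ i < len(matriz), where pyGet? is some
def max_linhas_colunas (matriz : List (List Int)) (i j : Int) : Bool :=
  if (matriz.length : Int) ≤ i then false
  else if (((PySem.List.pyGet? matriz i).getD []).length : Int) ≤ j then false
  else true

def tem_agua (matriz : List (List Int)) (i j : Int) : Bool :=
  if max_linhas_colunas matriz i j then
    if PySem.List.pyGetD ((PySem.List.pyGet? matriz i).getD []) j (0 : Int) ≠ 0 then false
    else true
  else false

-- the 'for h in range(0, tam)' loop with its break/append, as recursion on the loop
-- counter h (Python's range is lazy; the loop exits by break long before tam on any water gap)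
def hLoop (matriz : List (List Int)) (i j tam : Int) (h : Int) : Bool :=
  if hlt : h < tam then
    if h ≠ tam - 1 then
      if tem_agua matriz i (j + h) then hLoop matriz i j tam (h + 1) else false
    else
      if tem_agua matriz i (j + h) then true else hLoop matriz i j tam (h + 1)
  else false
termination_by (tam - h).toNat
decreasing_by all_goals omega

def get_pos_horizontal (matriz : List (List Int)) (tam : Int) : List (Int × Int) :=
  (PySem.List.pyRange 0 (matriz.length : Int) 1).foldl (fun acc i =>
    (PySem.List.pyRange 0 (((PySem.List.pyGet? matriz i).getD []).length : Int) 1).foldl (fun acc2 j =>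
      if hLoop matriz i j tam 0 then acc2 ++ [(i, j)] else acc2) acc) []

-- ===== PORT B =====
-- Source B's backward run-length loop (run = run+1 if row[j]==0 else 0, right to left),
-- as structural recursion producing the runs array
def computeRuns : List Int → List Int
  | [] => []
  | x :: rest =>
    let r := computeRuns rest
    (if x = 0 then r.headD 0 + 1 else 0) :: r

def get_pos_horizontal_alt (matriz : List (List Int)) (tam : Int) : List (Int × Int) :=
  if tam ≤ 0 then []
  else
    (PySem.List.enumerate matriz).foldl (fun acc p =>
      let runs := computeRuns p.2
      acc ++ ((PySem.List.pyRange 0 (p.2.length : Int) 1).filter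
        (fun j => decide (tam ≤ PySem.List.pyGetD runs j 0))).map (fun j => (p.1, j))) []

-- ===== PRECONDITION & SPEC =====
def Spec_get_pos_horizontal (matriz : List (List Int)) (tam : Int) (out : List (Int × Int)) : Prop := out = get_pos_horizontal_alt matriz tam
instance (matriz : List (List Int)) (tam : Int) (out : List (Int × Int)) : Decidable (Spec_get_pos_horizontal matriz tam out) := by unfold Spec_get_pos_horizontal; infer_instance

-- ===== CLAIM (what is proved, stated in full; the proofs are below) =====
def Claim_equal_get_pos_horizontal : Prop := ∀ (matriz : List (List Int)) (tam : Int), Dom_get_pos_horizontal matriz tam → Spec_get_pos_horizontal matriz tam (get_pos_horizontal matriz tam)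


-- ===== LEMMAS AND PROOFS =====

-- run length of leading zeros
def runLen : List Int → Nat
  | [] => 0
  | x :: r => if x = 0 then runLen r + 1 else 0

theorem computeRuns_eq (row : List Int) :
    computeRuns row = (List.range row.length).map (fun j => ((runLen (row.drop j) : Nat) : Int)) := by
  induction row with
  | nil => simp [computeRuns]
  | cons x rest ih =>
    simp only [computeRuns, ih, List.length_cons, List.range_succ_eq_map, List.map_cons,
      List.map_map, List.drop_succ_cons, List.drop_zero]
    refine congrArg₂ _ ?_ rfl
    cases rest with
    | nil => simp [runLen]
    | cons y t =>
      simp only [List.length_cons, List.range_succ_eq_map, List.map_cons, List.headD_cons,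
        List.drop_zero, runLen]
      split <;> simp

theorem runLen_ge_iff (l : List Int) (m : Nat) :
    (m ≤ runLen l) ↔ ∀ k < m, l[k]? = some 0 := by
  induction l generalizing m with
  | nil =>
    cases m with
    | zero => simp
    | succ m =>
      constructor
      · intro h; simp [runLen] at h
      · intro h; exact absurd (h 0 (by omega)) (by simp)
  | cons x r ih =>
    cases m with
    | zero => simp
    | succ m =>
      simp only [runLen]
      constructor
      · intro h k hk
        have hx : x = 0 := by by_contra hx; simp [hx] at h
        have hr : m ≤ runLen r := by simp [hx] at h; omega
        cases k with
        | zero => simp [hx]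
        | succ k => simpa using (ih m).1 hr k (by omega)
      · intro h
        have hx : x = 0 := by simpa using h 0 (by omega)
        have hr : m ≤ runLen r := (ih m).2 (fun k hk => by simpa using h (k+1) (by omega))
        simp [hx]; omega

theorem tem_agua_char (matriz : List (List Int)) (i k : Int) (row : List Int)
    (hrow : PySem.List.pyGet? matriz i = some row)
    (hilt : i < (matriz.length : Int)) (hk0 : 0 ≤ k) :
    tem_agua matriz i k = decide (row[k.toNat]? = some 0) := by
  unfold tem_agua max_linhas_colunas
  rw [hrow]
  simp only [Option.getD_some]
  by_cases hk : k < (row.length : Int)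
  · have hkn : k.toNat < row.length := by omega
    simp only [PySem.List.pyGetD_eq_getElem row (0:Int) hk0 hk, List.getElem?_eq_getElem hkn]
    split_ifs with h1 h2 <;> simp_all <;> omega
  · have hnone : row[k.toNat]? = none := List.getElem?_eq_none (by omega)
    split_ifs with h1 h2 <;> simp_all <;> omega

theorem hLoop_ge (matriz : List (List Int)) (i j tam : Int) :
    ∀ n : Nat, ∀ a : Int, (tam - a).toNat = n → a < tam →
      (hLoop matriz i j tam a = true ↔
        ∀ h : Int, a ≤ h → h < tam → tem_agua matriz i (j + h) = true) := by
  intro n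
  induction n with
  | zero => intro a hn ha; omega
  | succ n ih =>
    intro a hn ha
    rw [hLoop, dif_pos ha]
    by_cases hend : a = tam - 1
    · subst hend
      have hstop : hLoop matriz i j tam (tam - 1 + 1) = false := by
        rw [hLoop, dif_neg (by omega)]
      rw [if_neg (fun hne => hne rfl), hstop]
      by_cases hta : tem_agua matriz i (j + (tam - 1)) = true
      · rw [if_pos hta]
        constructor
        · intro _ h h1 h2
          have : h = tam - 1 := by omega
          subst this
          exact hta
        · intro _; rfl
      · rw [if_neg hta]
        simp only [Bool.false_eq_true, false_iff]
        intro hall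
        exact hta (hall (tam - 1) (le_refl _) (by omega))
    · have hlt : a + 1 < tam := by omega
      have ihs := ih (a + 1) (by omega) hlt
      simp only [hend, ne_eq, not_false_eq_true, if_true]
      by_cases hta : tem_agua matriz i (j + a) = true
      · simp only [hta, if_true, ihs]
        constructor
        · intro hall h h1 h2
          rcases eq_or_lt_of_le h1 with rfl | h1'
          · exact hta
          · exact hall h (by omega) h2
        · intro hall h h1 h2; exact hall h (by omega) h2
      · rw [if_neg hta]
        simp only [Bool.false_eq_true, false_iff]
        intro hall
        exact hta (hall a (le_refl _) ha)

theorem foldl_id {α β : Type} (l : List α) (acc : β) :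
    l.foldl (fun a _ => a) acc = acc := by
  induction l generalizing acc with
  | nil => rfl
  | cons x t ih => simpa using ih acc

theorem cond_eq (matriz : List (List Int)) (tam i j : Int) (row : List Int)
    (hrow : PySem.List.pyGet? matriz i = some row)
    (htam : 0 < tam) (hilt : i < (matriz.length : Int))
    (hj0 : 0 ≤ j) (hjlt : j < (row.length : Int)) :
    hLoop matriz i j tam 0
      = decide (tam ≤ PySem.List.pyGetD (computeRuns row) j 0) := by
  have hjn : j.toNat < row.length := by omega
  have hrhs : PySem.List.pyGetD (computeRuns row) j 0
      = ((runLen (row.drop j.toNat) : Nat) : Int) := by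
    rw [computeRuns_eq]
    rw [PySem.List.pyGetD_eq_getElem _ (0:Int) hj0 (by simp; omega)]
    simp [hjn]
  rw [hrhs]
  have hiff := hLoop_ge matriz i j tam tam.toNat 0 (by omega) htam
  have key : (hLoop matriz i j tam 0 = true)
      ↔ (tam ≤ ((runLen (row.drop j.toNat) : Nat) : Int)) := by
    rw [hiff]
    have h2 : (tam ≤ ((runLen (row.drop j.toNat) : Nat) : Int)) ↔
        tam.toNat ≤ runLen (row.drop j.toNat) := by omega
    rw [h2, runLen_ge_iff]
    constructor
    · intro hall k hk
      have hta := hall (k : Int) (by omega) (by omega)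
      rw [tem_agua_char matriz i (j + (k : Int)) row hrow hilt (by omega)] at hta
      have hidx : (j + (k : Int)).toNat = j.toNat + k := by omega
      rw [List.getElem?_drop]
      rw [decide_eq_true_iff] at hta
      rwa [hidx] at hta
    · intro hall h h0 hlt'
      rw [tem_agua_char matriz i (j + h) row hrow hilt (by omega)]
      have hk : h.toNat < tam.toNat := by omega
      have hv := hall h.toNat hk
      rw [List.getElem?_drop] at hv
      have hidx : (j + h).toNat = j.toNat + h.toNat := by omega
      rw [decide_eq_true_iff, hidx]
      exact hv
  cases hb : hLoop matriz i j tam 0 with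
  | false =>
    rw [hb] at key
    simp only [Bool.false_eq_true, false_iff] at key
    simp [key]
  | true =>
    rw [hb] at key
    simp only [true_iff] at key
    simp [key]

-- ===== VERDICT (by name: the statement is the Claim_ definition above) =====
theorem get_pos_horizontal_spec : Claim_equal_get_pos_horizontal := by
  intro matriz tam _
  unfold Spec_get_pos_horizontal get_pos_horizontal get_pos_horizontal_alt
  by_cases htam : tam ≤ 0
  · rw [if_pos htam]
    have hfalse : ∀ (i j : Int), hLoop matriz i j tam 0 = false := by
      intro i j; rw [hLoop, dif_neg (by omega)]
    simp only [hfalse, Bool.false_eq_true, if_false]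
    simp [foldl_id]
  · rw [if_neg htam]
    push_neg at htam
    rw [PySem.List.enumerate_eq_map_pyRange matriz []]
    rw [List.foldl_map]
    simp only [PySem.List.len_eq]
    apply PySem.List.foldl_congr_mem
    intro acc x hx
    obtain ⟨hx0, hxlt⟩ := PySem.List.mem_pyRange_one.mp hx
    have hrow : PySem.List.pyGet? matriz x = some (matriz[x.toNat]'(by omega)) :=
      PySem.List.pyGet?_eq_some_getElem matriz hx0 hxlt
    rw [PySem.List.foldl_append_if]
    simp only [hrow, Option.getD_some, PySem.List.pyGetD_eq_getElem matriz [] hx0 hxlt]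
    congr 1
    refine congrArg _ ?_
    refine List.filter_congr ?_
    intro jj hj
    obtain ⟨hj0, hjlt⟩ := PySem.List.mem_pyRange_one.mp hj
    exact cond_eq matriz tam x jj _ hrow htam hxlt hj0 hjlt
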